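-- pv_equiv track=rewrite | github.com/ian-lent/slop-minimization | slop-minimization/src/slop_minimization/data/token_labels.py | spans_to_token_labels
-- ===== SOURCE A (Python) =====
-- def spans_to_token_labels(
--     offset_mapping: list[tuple[int, int]],
--     special_tokens_mask: list[int],
--     spans: list[tuple[int, int]],
--     label_pad_token_id: int = -100,
-- ) -> list[int]:
--     """Map character spans to per-token labels. Special tokens get -100."""
--     labels: list[int] = []
--     for i, (start, end) in enumerate(offset_mapping):
--         if special_tokens_mask[i]:
--             labels.append(label_pad_token_id)
--             continue
--         token_mid = (start + end) // 2 if end > start else start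
--         in_span = any(sstart <= token_mid < send for sstart, send in spans)
--         labels.append(1 if in_span else 0)
--     return labels
-- ===== SOURCE B (Python) =====
-- def spans_to_token_labels(
--     offset_mapping,
--     special_tokens_mask,
--     spans,
--     label_pad_token_id=-100,
-- ):
--     """Map character spans to per-token labels. Special tokens get -100."""
--     # Merge the non-empty spans into disjoint, sorted intervals once.
--     merged = []
--     for s, e in sorted((p for p in spans if p[0] < p[1]), key=lambda p: p[0]):
--         if merged and s <= merged[-1][1]:
--             if e > merged[-1][1]:
--                 merged[-1] = (merged[-1][0], e)
--         else:
--             merged.append((s, e))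
--     starts = [s for s, _ in merged]
--     labels = []
--     for (start, end), special in zip(offset_mapping, special_tokens_mask):
--         if special:
--             labels.append(label_pad_token_id)
--             continue
--         mid = (start + end) // 2 if end > start else start
--         # binary search: rightmost insertion point of mid in starts (bisect_right)
--         lo, hi = 0, len(starts)
--         while lo < hi:
--             m = (lo + hi) // 2
--             if starts[m] <= mid:
--                 lo = m + 1
--             else:
--                 hi = m
--         j = lo - 1
--         labels.append(1 if j >= 0 and mid < merged[j][1] else 0)
--     return labels
-- ===== Notes on version B (the rewrite author's own statement) =====
-- stated objective: alternative
-- what changed: B preprocesses the spans once (filter empty spans, sort by start, merge into disjoint ordered intervals) and then labels each token by a binary search for its midpoint in the merged interval list, instead of A's linear scan over all spans for every token.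
import Mathlib
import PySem

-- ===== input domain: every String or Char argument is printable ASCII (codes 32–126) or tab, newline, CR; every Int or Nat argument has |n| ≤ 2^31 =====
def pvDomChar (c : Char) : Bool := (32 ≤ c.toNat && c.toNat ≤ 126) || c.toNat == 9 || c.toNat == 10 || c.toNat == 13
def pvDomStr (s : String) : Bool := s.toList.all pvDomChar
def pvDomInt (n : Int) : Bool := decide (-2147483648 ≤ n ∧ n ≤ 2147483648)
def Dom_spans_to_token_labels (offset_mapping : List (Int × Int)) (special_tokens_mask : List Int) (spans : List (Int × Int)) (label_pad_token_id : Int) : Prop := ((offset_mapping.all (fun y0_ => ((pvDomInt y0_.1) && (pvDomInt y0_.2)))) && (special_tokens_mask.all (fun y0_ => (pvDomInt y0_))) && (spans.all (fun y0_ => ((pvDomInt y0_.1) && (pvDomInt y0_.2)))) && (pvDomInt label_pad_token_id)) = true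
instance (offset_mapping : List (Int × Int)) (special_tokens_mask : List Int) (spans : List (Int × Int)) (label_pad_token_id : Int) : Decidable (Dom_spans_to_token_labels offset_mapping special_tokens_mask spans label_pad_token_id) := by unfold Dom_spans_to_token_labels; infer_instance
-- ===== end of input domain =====

-- B replaces A's per-token linear scan over all spans by a one-off sort+merge of the
-- spans into disjoint ordered intervals followed by a binary search per token midpoint
-- (objective: alternative algorithm; not measurably faster on a timing run's inputs).


-- ===== PORT A =====
def spans_to_token_labels (offset_mapping : List (Int × Int)) (special_tokens_mask : List Int) (spans : List (Int × Int)) (label_pad_token_id : Int) : List Int :=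
  (PySem.List.enumerate offset_mapping).foldl (fun labels ip =>
    if PySem.List.pyGetD special_tokens_mask ip.1 0 ≠ 0 then labels ++ [label_pad_token_id]
    else
      let token_mid := if ip.2.2 > ip.2.1 then PySem.Int.floordiv (ip.2.1 + ip.2.2) 2 else ip.2.1
      let in_span := spans.any (fun p => decide (p.1 ≤ token_mid) && decide (token_mid < p.2))
      labels ++ [if in_span then 1 else 0]) []

-- ===== PORT B =====
-- one step of Source B's merge loop (merged[-1] is the last element, updated in place or appended after)
def stlMergeStep (merged : List (Int × Int)) (p : Int × Int) : List (Int × Int) :=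
  match merged.getLast? with
  | none => merged ++ [p]
  | some l =>
      if p.1 ≤ l.2 then (if l.2 < p.2 then merged.dropLast ++ [(l.1, p.2)] else merged)
      else merged ++ [p]

-- Source B's preprocessing: keep non-empty spans, sort by start, merge into disjoint intervals
def stlMerged (spans : List (Int × Int)) : List (Int × Int) :=
  (PySem.List.sorted (spans.filter (fun p => decide (p.1 < p.2))) (fun p => p.1)).foldl stlMergeStep []

def spans_to_token_labels_alt (offset_mapping : List (Int × Int)) (special_tokens_mask : List Int) (spans : List (Int × Int)) (label_pad_token_id : Int) : List Int :=
  let merged := stlMerged spans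
  let starts := merged.map Prod.fst
  (offset_mapping.zip special_tokens_mask).foldl (fun labels t =>
    if t.2 ≠ 0 then labels ++ [label_pad_token_id]
    else
      let mid := if t.1.2 > t.1.1 then PySem.Int.floordiv (t.1.1 + t.1.2) 2 else t.1.1
      -- Source B's hand-written lo/hi halving loop is exactly bisect_right: PySem.List.bisectRight
      let k := PySem.List.bisectRight starts mid
      labels ++ [if 0 < k ∧ mid < (merged.getD (k - 1) (0, 0)).2 then 1 else 0]) []

-- ===== PRECONDITION & SPEC =====
-- Pre_ excludes exactly the inputs on which A raises IndexError: a special_tokens_mask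
-- shorter than offset_mapping.
def Pre_spans_to_token_labels (offset_mapping : List (Int × Int)) (special_tokens_mask : List Int) (spans : List (Int × Int)) (label_pad_token_id : Int) : Prop :=
  offset_mapping.length ≤ special_tokens_mask.length
instance (offset_mapping : List (Int × Int)) (special_tokens_mask : List Int) (spans : List (Int × Int)) (label_pad_token_id : Int) : Decidable (Pre_spans_to_token_labels offset_mapping special_tokens_mask spans label_pad_token_id) := by unfold Pre_spans_to_token_labels; infer_instance
def pvWitness_spans_to_token_labels : (List (Int × Int)) × List Int × (List (Int × Int)) × Int :=
  ([(0, 4), (4, 9)], [0, 1], [(1, 3)], -100)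
def Spec_spans_to_token_labels (offset_mapping : List (Int × Int)) (special_tokens_mask : List Int) (spans : List (Int × Int)) (label_pad_token_id : Int) (out : List Int) : Prop := out = spans_to_token_labels_alt offset_mapping special_tokens_mask spans label_pad_token_id
instance (offset_mapping : List (Int × Int)) (special_tokens_mask : List Int) (spans : List (Int × Int)) (label_pad_token_id : Int) (out : List Int) : Decidable (Spec_spans_to_token_labels offset_mapping special_tokens_mask spans label_pad_token_id out) := by unfold Spec_spans_to_token_labels; infer_instance

-- ===== CLAIM (what is proved, stated in full; the proofs are below) =====
def Claim_equal_spans_to_token_labels : Prop := ∀ (offset_mapping : List (Int × Int)) (special_tokens_mask : List Int) (spans : List (Int × Int)) (label_pad_token_id : Int), Dom_spans_to_token_labels offset_mapping special_tokens_mask spans label_pad_token_id → Pre_spans_to_token_labels offset_mapping special_tokens_mask spans label_pad_token_id → Spec_spans_to_token_labels offset_mapping special_tokens_mask spans label_pad_token_id (spans_to_token_labels offset_mapping special_tokens_mask spans label_pad_token_id)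

-- ===== LEMMAS AND PROOFS =====

-- "x lies in some span of l" — the Bool A computes for each token midpoint
def stlCov (l : List (Int × Int)) (x : Int) : Bool :=
  l.any (fun p => decide (p.1 ≤ x) && decide (x < p.2))

-- invariant of B's merged list: non-empty intervals, pairwise disjoint and ordered
def stlInv (L : List (Int × Int)) : Prop :=
  (∀ p ∈ L, p.1 < p.2) ∧ L.Pairwise (fun a b => a.2 < b.1)

-- dropping empty spans does not change coverage
theorem stlCov_filter (l : List (Int × Int)) (x : Int) :
    stlCov (l.filter (fun p => decide (p.1 < p.2))) x = stlCov l x := by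
  simp only [stlCov, List.any_filter]
  apply PySem.List.any_congr_mem
  intro p _
  by_cases h1 : p.1 ≤ x <;> by_cases h2 : x < p.2 <;> simp [h1, h2] <;> omega

-- B's merge loop keeps the invariant and preserves coverage
theorem stl_merge_spec (ms : List (Int × Int)) : ∀ acc : List (Int × Int),
    (∀ p ∈ ms, p.1 < p.2) →
    ms.Pairwise (fun a b => a.1 ≤ b.1) →
    stlInv acc →
    (∀ p ∈ ms, ∀ q ∈ acc.dropLast, q.2 < p.1) →
    (∀ p ∈ ms, ∀ l, acc.getLast? = some l → l.1 ≤ p.1) →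
    stlInv (ms.foldl stlMergeStep acc) ∧
      ∀ x, stlCov (ms.foldl stlMergeStep acc) x = (stlCov acc x || stlCov ms x) := by
  induction ms with
  | nil =>
    intro acc _ _ hInv _ _
    refine ⟨hInv, fun x => by simp [stlCov]⟩
  | cons p rest IH =>
    intro acc hne hsort hInv h4 h5
    rw [List.foldl_cons]
    have hp : p.1 < p.2 := hne p (List.mem_cons_self)
    have hrest_ne : ∀ q ∈ rest, q.1 < q.2 := fun q hq => hne q (List.mem_cons_of_mem _ hq)
    have hrest_sort := (List.pairwise_cons.mp hsort).2
    have hple : ∀ r ∈ rest, p.1 ≤ r.1 := fun r hr => (List.pairwise_cons.mp hsort).1 r hr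
    rcases hl : acc.getLast? with _ | l
    · -- merged is empty: append p
      have hacc : acc = [] := List.getLast?_eq_none_iff.mp hl
      subst hacc
      have hstep : stlMergeStep [] p = [p] := by simp [stlMergeStep]
      rw [hstep]
      obtain ⟨I1, I2⟩ := IH [p] hrest_ne hrest_sort
        ⟨by simpa using hp, by simp⟩ (by simp)
        (by intro r hr l' hl'; simp at hl'; subst hl'; exact hple r hr)
      refine ⟨I1, fun x => ?_⟩
      rw [I2 x]
      simp [stlCov]
    · -- merged = acc.dropLast ++ [l]
      have hDL : acc.dropLast ++ [l] = acc := List.dropLast_append_getLast? l hl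
      obtain ⟨hInvNe, hInvPair⟩ := hInv
      have hInvD : ∀ q ∈ acc.dropLast, q.1 < q.2 := by
        intro q hq; exact hInvNe q (by rw [← hDL]; exact List.mem_append_left _ hq)
      have hl12 : l.1 < l.2 := hInvNe l (by rw [← hDL]; simp)
      have hPairD : acc.dropLast.Pairwise (fun a b => a.2 < b.1) := by
        rw [← hDL] at hInvPair; exact (List.pairwise_append.mp hInvPair).1
      have hDl : ∀ q ∈ acc.dropLast, q.2 < l.1 := by
        rw [← hDL] at hInvPair
        intro q hq
        exact (List.pairwise_append.mp hInvPair).2.2 q hq l (by simp)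
      have h5p : l.1 ≤ p.1 := h5 p List.mem_cons_self l hl
      have h4p : ∀ q ∈ acc.dropLast, q.2 < p.1 := fun q hq => h4 p List.mem_cons_self q hq
      by_cases hc1 : p.1 ≤ l.2
      · by_cases hc2 : l.2 < p.2
        · -- p overlaps the last interval and extends it: last becomes (l.1, p.2)
          have hstep : stlMergeStep acc p = acc.dropLast ++ [(l.1, p.2)] := by
            simp [stlMergeStep, hl, hc1, hc2]
          rw [hstep]
          obtain ⟨I1, I2⟩ := IH (acc.dropLast ++ [(l.1, p.2)]) hrest_ne hrest_sort
            ⟨by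
              intro q hq
              rcases List.mem_append.mp hq with h | h
              · exact hInvD q h
              · simp at h; subst h; omega,
             by
              rw [List.pairwise_append]
              exact ⟨hPairD, List.pairwise_singleton _ _, by
                intro q hq r hr; simp at hr; subst hr; exact hDl q hq⟩⟩
            (by
              intro r hr q hq
              rw [List.dropLast_concat] at hq
              exact lt_of_lt_of_le (h4p q hq) (hple r hr))
            (by
              intro r hr l' hl'
              rw [List.getLast?_concat] at hl'
              cases hl'
              exact le_trans h5p (hple r hr))
          refine ⟨I1, fun x => ?_⟩
          rw [I2 x]
          have key : (decide (l.1 ≤ x) && decide (x < p.2)) =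
              ((decide (l.1 ≤ x) && decide (x < l.2)) || (decide (p.1 ≤ x) && decide (x < p.2))) := by
            by_cases a : l.1 ≤ x <;> by_cases b : x < p.2 <;> by_cases c : x < l.2 <;>
              by_cases d : p.1 ≤ x <;> simp [a, b, c, d] <;> omega
          conv_rhs => rw [← hDL]
          simp only [stlCov, List.any_append, List.any_cons, List.any_nil]
          rw [key]
          cases acc.dropLast.any (fun p => decide (p.1 ≤ x) && decide (x < p.2)) <;>
            cases hd : (decide (l.1 ≤ x) && decide (x < l.2)) <;> simp [hd] <;>
            cases rest.any (fun p => decide (p.1 ≤ x) && decide (x < p.2)) <;> simp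
        · -- p is absorbed into the last interval: merged unchanged
          have hstep : stlMergeStep acc p = acc := by
            simp [stlMergeStep, hl, hc1, hc2]
          rw [hstep]
          obtain ⟨I1, I2⟩ := IH acc hrest_ne hrest_sort ⟨hInvNe, hInvPair⟩
            (fun r hr => h4 r (List.mem_cons_of_mem _ hr))
            (fun r hr => h5 r (List.mem_cons_of_mem _ hr))
          refine ⟨I1, fun x => ?_⟩
          rw [I2 x]
          by_cases hcp : (decide (p.1 ≤ x) && decide (x < p.2)) = true
          · have hcl : stlCov acc x = true := by
              rw [← hDL]
              simp only [stlCov, List.any_append, List.any_cons, List.any_nil]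
              simp at hcp
              have : (decide (l.1 ≤ x) && decide (x < l.2)) = true := by
                simp; omega
              simp [this]
            simp only [stlCov, List.any_cons] at hcl ⊢
            rw [hcl, hcp]
            simp
          · rw [Bool.not_eq_true] at hcp
            simp only [stlCov, List.any_cons]
            rw [hcp]
            simp
      · -- p is disjoint from (and right of) the last interval: append it
        push_neg at hc1
        have hstep : stlMergeStep acc p = acc ++ [p] := by
          simp [stlMergeStep, hl, hc1, not_le.mpr hc1]
        rw [hstep]
        obtain ⟨I1, I2⟩ := IH (acc ++ [p]) hrest_ne hrest_sort
          ⟨by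
            intro q hq
            rcases List.mem_append.mp hq with h | h
            · exact hInvNe q h
            · simp at h; subst h; exact hp,
           by
            rw [List.pairwise_append]
            refine ⟨hInvPair, List.pairwise_singleton _ _, ?_⟩
            intro q hq r hr; simp at hr; subst hr
            rw [← hDL] at hq
            rcases List.mem_append.mp hq with h | h
            · have := hDl q h; omega
            · simp at h; subst h; exact hc1⟩
          (by
            intro r hr q hq
            rw [List.dropLast_concat] at hq
            rw [← hDL] at hq
            rcases List.mem_append.mp hq with h | h
            · exact lt_of_lt_of_le (h4p q h) (hple r hr)
            · simp at h; subst h; exact lt_of_lt_of_le hc1 (hple r hr))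
          (by
            intro r hr l' hl'
            rw [List.getLast?_concat] at hl'
            cases hl'
            exact hple r hr)
        refine ⟨I1, fun x => ?_⟩
        rw [I2 x]
        simp only [stlCov, List.any_append, List.any_cons, List.any_nil]
        cases acc.any (fun p => decide (p.1 ≤ x) && decide (x < p.2)) <;>
          cases hd : (decide (p.1 ≤ x) && decide (x < p.2)) <;> simp [hd]

-- the merged list satisfies the invariant and covers exactly what the raw spans cover
theorem stl_merge_top (spans : List (Int × Int)) :
    stlInv (stlMerged spans) ∧ ∀ x, stlCov (stlMerged spans) x = stlCov spans x := by
  have hms := stl_merge_spec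
    (PySem.List.sorted (spans.filter (fun p => decide (p.1 < p.2))) (fun p => p.1)) []
    (by
      intro p hp
      rw [PySem.List.mem_sorted] at hp
      have := (List.mem_filter.mp hp).2
      simpa using this)
    (PySem.List.sorted_pairwise _ _)
    ⟨by simp, by simp⟩ (by simp) (by simp)
  refine ⟨hms.1, fun x => ?_⟩
  have := hms.2 x
  rw [stlMerged, this]
  have hperm : (PySem.List.sorted (spans.filter (fun p => decide (p.1 < p.2))) (fun p => p.1)).Perm
      (spans.filter (fun p => decide (p.1 < p.2))) := PySem.List.sorted_perm _ _ _
  simp only [stlCov] at *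
  rw [hperm.any_eq]
  simp only [List.any_nil, Bool.false_or]
  simpa [stlCov] using stlCov_filter spans x

-- on a disjoint ordered interval list, B's bisect_right test decides coverage
theorem stl_search (L : List (Int × Int)) (x : Int) (hInv : stlInv L) :
    (0 < PySem.List.bisectRight (L.map Prod.fst) x ∧
      x < (L.getD (PySem.List.bisectRight (L.map Prod.fst) x - 1) (0, 0)).2) ↔
    stlCov L x = true := by
  obtain ⟨hne, hpair⟩ := hInv
  have hsorted : (L.map Prod.fst).Pairwise (· ≤ ·) := by
    rw [List.pairwise_map]
    refine hpair.imp_of_mem ?_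
    intro a b ha _ h
    exact le_of_lt (lt_trans (hne a ha) h)
  obtain ⟨hk, hlo, hhi⟩ := PySem.List.bisectRight_spec (L.map Prod.fst) x hsorted
  set k := PySem.List.bisectRight (L.map Prod.fst) x with hkdef
  have hlen : (L.map Prod.fst).length = L.length := by simp
  rw [hlen] at hk
  constructor
  · rintro ⟨hk0, hxe⟩
    have hkl : k - 1 < L.length := by omega
    have hst : L[k-1].1 ≤ x := by
      have := hlo (k-1) (by simpa using hkl) (by omega)
      rwa [List.getElem_map] at this
    have hgd : L.getD (k-1) (0,0) = L[k-1] := List.getD_eq_getElem L (0,0) hkl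
    rw [hgd] at hxe
    simp only [stlCov, List.any_eq_true]
    exact ⟨L[k-1], List.getElem_mem _, by simp; omega⟩
  · intro hcov
    simp only [stlCov, List.any_eq_true] at hcov
    obtain ⟨q, hq, hq12⟩ := hcov
    simp at hq12
    obtain ⟨j, hj, rfl⟩ := List.mem_iff_getElem.mp hq
    have hjk : j < k := by
      by_contra hcon
      push_neg at hcon
      have := hhi j (by simpa using hj) (by omega)
      rw [List.getElem_map] at this
      omega
    have hk0 : 0 < k := by omega
    have hkl : k - 1 < L.length := by omega
    have hst : L[k-1].1 ≤ x := by
      have := hlo (k-1) (by simpa using hkl) (by omega)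
      rwa [List.getElem_map] at this
    have hj_eq : j = k - 1 := by
      by_contra hne'
      have hjlt : j < k - 1 := by omega
      have := List.pairwise_iff_getElem.mp hpair j (k-1) hj hkl hjlt
      omega
    refine ⟨hk0, ?_⟩
    rw [List.getD_eq_getElem L (0,0) hkl]
    have hEq : L[k-1] = L[j] := by simp only [show k - 1 = j from hj_eq.symm]
    rw [hEq]
    omega

-- per token: B's binary-search label equals A's linear-scan label
theorem stl_token (spans : List (Int × Int)) (mid : Int) :
    (if 0 < PySem.List.bisectRight ((stlMerged spans).map Prod.fst) mid ∧
        mid < ((stlMerged spans).getD (PySem.List.bisectRight ((stlMerged spans).map Prod.fst) mid - 1) (0, 0)).2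
      then (1 : Int) else 0) =
    (if stlCov spans mid then 1 else 0) := by
  obtain ⟨hinv, hcov⟩ := stl_merge_top spans
  have hiff := stl_search (stlMerged spans) mid hinv
  rw [hcov mid] at hiff
  by_cases h : stlCov spans mid = true
  · rw [if_pos (hiff.mpr h)]
    simp [h]
  · rw [if_neg (fun hc => h (hiff.mp hc))]
    simp [h]

-- ===== VERDICT (by name: the statement is the Claim_ definition above) =====
theorem spans_to_token_labels_spec : Claim_equal_spans_to_token_labels := by
  intro offset_mapping special_tokens_mask spans label_pad_token_id _ hpre
  unfold Pre_spans_to_token_labels at hpre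
  unfold Spec_spans_to_token_labels
  unfold spans_to_token_labels spans_to_token_labels_alt
  dsimp only
  refine Eq.trans (PySem.List.foldl_congr_mem _ _
      (g := fun (labels : List Int) (ip : Int × Int × Int) => labels ++
        [if PySem.List.pyGetD special_tokens_mask ip.1 0 ≠ 0 then label_pad_token_id
         else if spans.any (fun p => decide (p.1 ≤ (if ip.2.2 > ip.2.1 then PySem.Int.floordiv (ip.2.1 + ip.2.2) 2 else ip.2.1)) &&
                decide ((if ip.2.2 > ip.2.1 then PySem.Int.floordiv (ip.2.1 + ip.2.2) 2 else ip.2.1) < p.2)) then 1 else 0])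
      _ (by intro acc ip _; dsimp only; split <;> rfl)) ?_
  refine Eq.trans ?_ (Eq.symm (PySem.List.foldl_congr_mem _ _
      (g := fun (labels : List Int) (t : (Int × Int) × Int) => labels ++
        [if t.2 ≠ 0 then label_pad_token_id
         else if 0 < PySem.List.bisectRight ((stlMerged spans).map Prod.fst) (if t.1.2 > t.1.1 then PySem.Int.floordiv (t.1.1 + t.1.2) 2 else t.1.1) ∧
                (if t.1.2 > t.1.1 then PySem.Int.floordiv (t.1.1 + t.1.2) 2 else t.1.1) <
                  ((stlMerged spans).getD (PySem.List.bisectRight ((stlMerged spans).map Prod.fst) (if t.1.2 > t.1.1 then PySem.Int.floordiv (t.1.1 + t.1.2) 2 else t.1.1) - 1) (0, 0)).2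
                then 1 else 0])
      _ (by intro acc t _; dsimp only; split <;> rfl)))
  rw [PySem.List.foldl_append_singleton_eq_map, PySem.List.foldl_append_singleton_eq_map]
  simp only [List.nil_append]
  apply List.ext_getElem
  · simp [PySem.List.length_enumerate]; omega
  · intro k h1 h2
    simp only [List.getElem_map]
    rw [PySem.List.getElem_enumerate]
    rw [List.getElem_zip]
    have hk1 : k < offset_mapping.length := by
      simpa [PySem.List.length_enumerate] using h1
    have hkm : k < special_tokens_mask.length := lt_of_lt_of_le hk1 hpre
    dsimp only
    have hidx : PySem.List.pyGetD special_tokens_mask ((0 : Int) + (k : Int)) 0 = special_tokens_mask[k] := by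
      rw [PySem.List.pyGetD_eq_getElem special_tokens_mask 0 (by omega) (by push_cast; omega)]
      congr 1
      omega
    rw [hidx]
    by_cases hm : special_tokens_mask[k] ≠ 0
    · simp [hm]
    · rw [if_neg hm, if_neg hm]
      exact (stl_token spans _).symm
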